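-- pv_equiv track=rewrite | github.com/monnn/Programming101 | magic_square.py | sum_in_each_row
-- ===== SOURCE A (Python) =====
-- def sum_in_each_row(matrix):
--     sum_in_each_row = True
--     for i in range(0, len(matrix)):
--         for j in range(0, len(matrix)):
--             if sum(matrix[i]) != sum(matrix[j]):
--                 sum_in_each_row = False
--             else:
--                 pass
--     return sum_in_each_row
-- ===== SOURCE B (Python) =====
-- def sum_in_each_row(matrix):
--     return len({sum(row) for row in matrix}) <= 1
-- ===== Notes on version B (the rewrite author's own statement) =====
-- stated objective: simpler
-- what changed: Replaces the nested all-pairs index loop (with sums recomputed inside) by a single comprehension collecting the set of row sums and a size check (<= 1, so the empty matrix stays True).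
import Mathlib
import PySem

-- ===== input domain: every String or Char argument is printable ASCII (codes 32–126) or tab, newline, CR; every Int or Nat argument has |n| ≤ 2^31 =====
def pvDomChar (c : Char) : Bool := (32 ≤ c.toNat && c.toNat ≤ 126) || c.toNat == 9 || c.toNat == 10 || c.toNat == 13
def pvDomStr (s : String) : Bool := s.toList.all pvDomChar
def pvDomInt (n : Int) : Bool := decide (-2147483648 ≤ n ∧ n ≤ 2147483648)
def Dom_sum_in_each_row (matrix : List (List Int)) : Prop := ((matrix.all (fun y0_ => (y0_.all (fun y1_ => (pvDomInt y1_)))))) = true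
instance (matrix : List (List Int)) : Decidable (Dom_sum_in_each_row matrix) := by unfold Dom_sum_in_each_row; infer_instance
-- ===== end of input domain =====

-- B replaces A's nested all-pairs index loop by one pass building the set of row sums plus a size check (simpler, and asymptotically fewer sum evaluations).

-- ===== PORT A =====
def sum_in_each_row (matrix : List (List Int)) : Bool :=
  (PySem.List.pyRange 0 (PySem.List.len matrix) 1).foldl (fun acc i =>
    (PySem.List.pyRange 0 (PySem.List.len matrix) 1).foldl (fun acc2 j =>
      if (PySem.List.pyGetD matrix i []).sum ≠ (PySem.List.pyGetD matrix j []).sum then false else acc2) acc) true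

-- ===== PORT B =====
def sum_in_each_row_alt (matrix : List (List Int)) : Bool :=
  decide (PySem.Set.len (PySem.Set.ofList (matrix.map (fun row => row.sum))) ≤ 1)

-- ===== PRECONDITION & SPEC =====
def Spec_sum_in_each_row (matrix : List (List Int)) (out : Bool) : Prop := out = sum_in_each_row_alt matrix
instance (matrix : List (List Int)) (out : Bool) : Decidable (Spec_sum_in_each_row matrix out) := by unfold Spec_sum_in_each_row; infer_instance

-- ===== CLAIM (what is proved, stated in full; the proofs are below) =====
def Claim_equal_sum_in_each_row : Prop := ∀ (matrix : List (List Int)), Dom_sum_in_each_row matrix → Spec_sum_in_each_row matrix (sum_in_each_row matrix)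

-- ===== LEMMAS AND PROOFS =====

-- A's result characterised: all pairs of rows have equal sums.
theorem sum_in_each_row_eq_true_iff (matrix : List (List Int)) :
    sum_in_each_row matrix = true ↔ ∀ r ∈ matrix, ∀ s ∈ matrix, r.sum = s.sum := by
  unfold sum_in_each_row
  rw [show (PySem.List.len matrix) = ((matrix.length : Int)) from PySem.List.len_eq matrix]
  rw [PySem.List.foldl_pyRange_zero_pyGetD' matrix [] (fun acc ri =>
        (PySem.List.pyRange 0 (matrix.length : Int) 1).foldl (fun acc2 j =>
          if ri.sum ≠ (PySem.List.pyGetD matrix j []).sum then false else acc2) acc) true]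
  have hinner : ∀ (acc : Bool) (ri : List Int),
      (PySem.List.pyRange 0 (matrix.length : Int) 1).foldl (fun acc2 j =>
        if ri.sum ≠ (PySem.List.pyGetD matrix j []).sum then false else acc2) acc
      = (acc && !matrix.any (fun rj => decide (ri.sum ≠ rj.sum))) := by
    intro acc ri
    rw [PySem.List.foldl_pyRange_zero_pyGetD' matrix [] (fun acc2 rj =>
          if ri.sum ≠ rj.sum then false else acc2) acc]
    rw [show (fun (acc2 : Bool) (rj : List Int) => if ri.sum ≠ rj.sum then false else acc2)
          = (fun acc2 rj => if decide (ri.sum ≠ rj.sum) = true then false else acc2) by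
        funext acc2 rj; split_ifs with h1 h2 <;> simp_all]
    exact PySem.List.foldl_if_false_eq _ _ _
  simp only [hinner]
  rw [show (fun (acc : Bool) (ri : List Int) => acc && !matrix.any (fun rj => decide (ri.sum ≠ rj.sum)))
        = (fun acc ri => if (matrix.any (fun rj => decide (ri.sum ≠ rj.sum))) = true then false else acc) by
      funext acc ri; cases matrix.any (fun rj => decide (ri.sum ≠ rj.sum)) <;> simp]
  rw [PySem.List.foldl_if_false_eq _ _ _]
  simp

-- a Nodup list has at most one element iff all its elements coincide
theorem nodup_length_le_one {s : List Int} (h : s.Nodup) :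
    s.length ≤ 1 ↔ ∀ x ∈ s, ∀ y ∈ s, x = y := by
  match s with
  | [] => simp
  | [_] => simp
  | a :: b :: t =>
    simp only [List.nodup_cons, List.mem_cons] at h
    constructor
    · intro hl; simp at hl
    · intro hall
      exact absurd (hall a (by simp) b (by simp)) (fun hab => h.1 (Or.inl hab))

-- B's result characterised the same way.
theorem sum_in_each_row_alt_eq_true_iff (matrix : List (List Int)) :
    sum_in_each_row_alt matrix = true ↔ ∀ r ∈ matrix, ∀ s ∈ matrix, r.sum = s.sum := by
  unfold sum_in_each_row_alt
  have hlen : PySem.Set.len (PySem.Set.ofList (matrix.map (fun row => row.sum)))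
      = ((PySem.Set.ofList (matrix.map (fun row => row.sum))).length : Int) := by
    simp [PySem.Set.len]
  rw [hlen]
  have h1 : (((PySem.Set.ofList (matrix.map (fun row => row.sum))).length : Int) ≤ 1)
      ↔ (PySem.Set.ofList (matrix.map (fun row => row.sum))).length ≤ 1 := by omega
  rw [decide_eq_true_iff, h1,
      nodup_length_le_one (PySem.Set.nodup_ofList _)]
  constructor
  · intro hall r hr s hs
    exact hall _ (by rw [PySem.Set.mem_ofList]; exact List.mem_map_of_mem hr)
               _ (by rw [PySem.Set.mem_ofList]; exact List.mem_map_of_mem hs)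
  · intro hall x hx y hy
    rw [PySem.Set.mem_ofList, List.mem_map] at hx hy
    obtain ⟨r, hr, rfl⟩ := hx
    obtain ⟨s, hs, rfl⟩ := hy
    exact hall r hr s hs

-- ===== VERDICT (by name: the statement is the Claim_ definition above) =====
theorem sum_in_each_row_spec : Claim_equal_sum_in_each_row := by
  intro matrix _
  unfold Spec_sum_in_each_row
  have := (sum_in_each_row_eq_true_iff matrix).trans (sum_in_each_row_alt_eq_true_iff matrix).symm
  cases hA : sum_in_each_row matrix <;> cases hB : sum_in_each_row_alt matrix <;> simp_all
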